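-- pv_equiv track=rewrite | github.com/hailpam/tech-interview-handbook | coding/backtracking/soduku.py | get_submatrix_indexes
-- ===== SOURCE A (Python) =====
-- def get_submatrix_indexes(cell):
--     submatrices = [
--         [(0,0), (2,2)],
--         [(3,0), (5,2)],
--         [(6,0), (8,2)],
--         [(0,3), (2,5)],
--         [(3,3), (5,5)],
--         [(6,3), (8,5)],
--         [(0,6), (2,8)],
--         [(3,6), (5,8)],
--         [(6,6), (8,8)],
--     ]
--     for submatrix in submatrices:
--         l_bound = submatrix[0]
--         u_bound = submatrix[1]
--         if cell[0] >= l_bound[0] and cell[1] >= l_bound[1] and \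
--            cell[0] <= u_bound[0] and cell[1] <= u_bound[1]:
--             return l_bound, u_bound
-- ===== SOURCE B (Python) =====
-- def get_submatrix_indexes(cell):
--     if 0 <= cell[0] <= 8 and 0 <= cell[1] <= 8:
--         lr = (cell[0] // 3) * 3
--         lc = (cell[1] // 3) * 3
--         return (lr, lc), (lr + 2, lc + 2)
--     return None
-- ===== Notes on version B (the rewrite author's own statement) =====
-- stated objective: simpler
-- what changed: Replaced the scan over nine hard-coded block corners with a range guard plus direct floor-division arithmetic ((r//3)*3, (c//3)*3).
import Mathlib
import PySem

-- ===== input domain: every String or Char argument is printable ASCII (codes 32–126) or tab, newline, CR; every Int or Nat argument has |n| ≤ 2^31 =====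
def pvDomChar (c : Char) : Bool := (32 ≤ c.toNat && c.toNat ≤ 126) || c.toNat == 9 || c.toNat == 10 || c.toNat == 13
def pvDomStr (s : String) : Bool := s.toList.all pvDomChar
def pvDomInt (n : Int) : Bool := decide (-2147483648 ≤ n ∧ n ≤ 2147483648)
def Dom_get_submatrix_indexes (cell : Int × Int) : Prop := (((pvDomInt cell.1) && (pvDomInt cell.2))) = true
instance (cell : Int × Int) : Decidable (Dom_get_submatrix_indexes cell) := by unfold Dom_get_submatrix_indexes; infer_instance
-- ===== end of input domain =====

-- B replaces A's scan over nine hard-coded block corners with direct floor-division arithmetic (simpler; no scan).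

-- ===== PORT A =====
-- A's loop over the submatrix list, returning the first matching bounds (Python returns None if none matches; Pre_ excludes that)
def pvScanA (cell : Int × Int) : List ((Int × Int) × (Int × Int)) → Option ((Int × Int) × (Int × Int))
  | [] => none
  | sm :: rest =>
    let l_bound := sm.1
    let u_bound := sm.2
    if cell.1 ≥ l_bound.1 ∧ cell.2 ≥ l_bound.2 ∧ cell.1 ≤ u_bound.1 ∧ cell.2 ≤ u_bound.2 then
      some (l_bound, u_bound)
    else pvScanA cell rest

def get_submatrix_indexes (cell : Int × Int) : (Int × Int) × (Int × Int) :=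
  (pvScanA cell
    [((0,0), (2,2)), ((3,0), (5,2)), ((6,0), (8,2)),
     ((0,3), (2,5)), ((3,3), (5,5)), ((6,3), (8,5)),
     ((0,6), (2,8)), ((3,6), (5,8)), ((6,6), (8,8))]).getD (((0,0)), ((0,0)))

-- ===== PORT B =====
-- B returns None outside the 9x9 board (excluded by Pre_); modelled as Option + default
def get_submatrix_indexes_alt (cell : Int × Int) : (Int × Int) × (Int × Int) :=
  (if 0 ≤ cell.1 ∧ cell.1 ≤ 8 ∧ 0 ≤ cell.2 ∧ cell.2 ≤ 8 then
    let lr := (PySem.Int.floordiv cell.1 3) * 3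
    let lc := (PySem.Int.floordiv cell.2 3) * 3
    some ((lr, lc), (lr + 2, lc + 2))
  else none).getD ((0,0), (0,0))

-- ===== PRECONDITION & SPEC =====
-- Pre_ excludes cells outside the 9x9 board, where Python's A falls off the loop and returns None (no tuple value).
def Pre_get_submatrix_indexes (cell : Int × Int) : Prop :=
  0 ≤ cell.1 ∧ cell.1 ≤ 8 ∧ 0 ≤ cell.2 ∧ cell.2 ≤ 8
instance (cell : Int × Int) : Decidable (Pre_get_submatrix_indexes cell) := by
  unfold Pre_get_submatrix_indexes; infer_instance
def pvWitness_get_submatrix_indexes : (Int × Int) := (4, 7)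

def Spec_get_submatrix_indexes (cell : Int × Int) (out : (Int × Int) × (Int × Int)) : Prop := out = get_submatrix_indexes_alt cell
instance (cell : Int × Int) (out : (Int × Int) × (Int × Int)) : Decidable (Spec_get_submatrix_indexes cell out) := by unfold Spec_get_submatrix_indexes; infer_instance

-- ===== CLAIM (what is proved, stated in full; the proofs are below) =====
def Claim_equal_get_submatrix_indexes : Prop := ∀ (cell : Int × Int), Dom_get_submatrix_indexes cell → Pre_get_submatrix_indexes cell → Spec_get_submatrix_indexes cell (get_submatrix_indexes cell)

-- ===== LEMMAS AND PROOFS =====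

-- ===== VERDICT (by name: the statement is the Claim_ definition above) =====
theorem get_submatrix_indexes_spec : Claim_equal_get_submatrix_indexes := by
  intro ⟨r, c⟩ _ hpre
  obtain ⟨hr0, hr8, hc0, hc8⟩ := hpre
  unfold Spec_get_submatrix_indexes
  interval_cases r <;> interval_cases c <;> decide
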